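-- pv_equiv track=rewrite | github.com/ravenoak/autoresearch | src/autoresearch/synthesis.py | compress_claims
-- ===== SOURCE A (Python) =====
-- from typing import List, Dict
--
-- def compress_claims(claims: List[Dict[str, str]], token_budget: int) -> List[Dict[str, str]]:
--     """Trim claim list so total tokens stay within ``token_budget``.
--
--     Claims are kept in order and truncated when the remaining budget is
--     insufficient. The final claim may be shortened with an ellipsis if
--     required.
--
--     Args:
--         claims: Claims with ``content`` fields.
--         token_budget: Maximum total tokens to retain.
--
--     Returns:
--         A list of claims respecting the budget.
--     """
--
--     compressed: List[Dict[str, str]] = []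
--     tokens_used = 0
--     for claim in claims:
--         text = claim.get("content", "")
--         tokens = text.split()
--         if tokens_used + len(tokens) <= token_budget:
--             compressed.append(claim)
--             tokens_used += len(tokens)
--             continue
--
--         remaining = token_budget - tokens_used
--         if remaining <= 0:
--             break
--         truncated = " ".join(tokens[:remaining]) + "..."
--         new_claim = {**claim, "content": truncated}
--         compressed.append(new_claim)
--         break
--
--     return compressed
-- ===== SOURCE B (Python) =====
-- from itertools import accumulate
-- from typing import List, Dict
--
-- def compress_claims(claims: List[Dict[str, str]], token_budget: int) -> List[Dict[str, str]]:
--     """Prefix-sum re-implementation: cut the list at the first claim whose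
--     cumulative token total exceeds the budget, then shorten that claim."""
--     token_lists = [c.get("content", "").split() for c in claims]
--     totals = list(accumulate(len(t) for t in token_lists))
--     i = next((k for k, t in enumerate(totals) if t > token_budget), len(claims))
--     out = claims[:i]
--     if i < len(claims):
--         before = totals[i - 1] if i > 0 else 0
--         remaining = token_budget - before
--         if remaining > 0:
--             out.append({**claims[i], "content": " ".join(token_lists[i][:remaining]) + "..."})
--     return out
-- ===== Notes on version B (the rewrite author's own statement) =====
-- stated objective: alternative
-- what changed: Replaces A's single stateful loop (running token counter with conditional append/break) by a compositional pipeline: precompute each claim's token list, build cumulative totals with itertools.accumulate, locate the first prefix total exceeding the budget, slice the kept prefix and separately build the one truncated claim.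
import Mathlib
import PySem

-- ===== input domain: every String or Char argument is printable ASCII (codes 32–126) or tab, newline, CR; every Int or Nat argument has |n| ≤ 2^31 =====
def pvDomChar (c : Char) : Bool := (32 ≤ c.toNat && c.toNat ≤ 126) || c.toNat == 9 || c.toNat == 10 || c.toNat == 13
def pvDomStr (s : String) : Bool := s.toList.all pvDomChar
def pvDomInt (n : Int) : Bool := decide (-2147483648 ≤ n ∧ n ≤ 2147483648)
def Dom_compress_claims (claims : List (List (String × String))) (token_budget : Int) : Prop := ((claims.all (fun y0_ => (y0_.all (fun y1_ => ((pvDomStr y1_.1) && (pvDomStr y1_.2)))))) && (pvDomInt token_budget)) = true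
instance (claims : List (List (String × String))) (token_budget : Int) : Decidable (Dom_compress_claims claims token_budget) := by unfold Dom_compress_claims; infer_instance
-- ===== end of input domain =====

-- B replaces A's stateful running-total-with-break loop by a prefix-sum pipeline (token lists, accumulated totals, cut index, slice); alternative decomposition, same cost.


-- ===== PORT A =====
-- A's for-loop with `compressed`/`tokens_used` running state and `break`, as structural recursion
def compress_claims_go (token_budget : Int) (claims : List (List (String × String))) (tokens_used : Int) : List (List (String × String)) :=
  match claims with
  | [] => []
  | claim :: rest =>
    let text := (PySem.Dict.ofList claim).getD "content" ""
    let tokens := PySem.Str.split₀ text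
    if tokens_used + (tokens.length : Int) ≤ token_budget then
      claim :: compress_claims_go token_budget rest (tokens_used + tokens.length)
    else
      let remaining := token_budget - tokens_used
      if remaining ≤ 0 then []
      else [((PySem.Dict.ofList claim).insert "content"
              (PySem.Str.join " " (PySem.List.slice tokens none (some remaining)) ++ "...")).items]

-- ===== PORT B =====
-- itertools.accumulate (running sums)
def compress_claims (claims : List (List (String × String))) (token_budget : Int) : List (List (String × String)) :=
  compress_claims_go token_budget claims 0

def pvAccumulate (xs : List Int) (acc : Int) : List Int :=
  match xs with
  | [] => []
  | x :: rest => (acc + x) :: pvAccumulate rest (acc + x)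

-- next((k for k, t in enumerate(totals) if t > token_budget), len(claims))
def pvFindIdxGT (totals : List Int) (b : Int) : Nat :=
  match totals with
  | [] => 0
  | t :: rest => if b < t then 0 else pvFindIdxGT rest b + 1

def compress_claims_alt (claims : List (List (String × String))) (token_budget : Int) : List (List (String × String)) :=
  let tokenLists := claims.map (fun c => PySem.Str.split₀ ((PySem.Dict.ofList c).getD "content" ""))
  let totals := pvAccumulate (tokenLists.map (fun t => (t.length : Int))) 0
  let i := pvFindIdxGT totals token_budget
  let out := claims.take i
  if i < claims.length then
    let before := if 0 < i then totals.getD (i - 1) 0 else 0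
    let remaining := token_budget - before
    if 0 < remaining then
      out ++ [((PySem.Dict.ofList (claims.getD i [])).insert "content"
               (PySem.Str.join " " (PySem.List.slice (tokenLists.getD i []) none (some remaining)) ++ "...")).items]
    else out
  else out


-- ===== PRECONDITION & SPEC =====
def Spec_compress_claims (claims : List (List (String × String))) (token_budget : Int) (out : List (List (String × String))) : Prop := out = compress_claims_alt claims token_budget
instance (claims : List (List (String × String))) (token_budget : Int) (out : List (List (String × String))) : Decidable (Spec_compress_claims claims token_budget out) := by unfold Spec_compress_claims; infer_instance

-- ===== CLAIM (what is proved, stated in full; the proofs are below) =====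
def Claim_equal_compress_claims : Prop := ∀ (claims : List (List (String × String))) (token_budget : Int), Dom_compress_claims claims token_budget → Spec_compress_claims claims token_budget (compress_claims claims token_budget)

-- ===== LEMMAS AND PROOFS =====

theorem pvAccumulate_shift (xs : List Int) (a : Int) :
    pvAccumulate xs a = (pvAccumulate xs 0).map (fun t => a + t) := by
  induction xs generalizing a with
  | nil => simp [pvAccumulate]
  | cons x rest ih =>
    simp only [pvAccumulate, List.map_cons, zero_add, List.cons.injEq]
    refine ⟨trivial, ?_⟩
    rw [ih (a + x), ih x, List.map_map]
    exact List.map_congr_left (fun t _ => by simp [Function.comp, add_assoc])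

theorem pvAccumulate_length (xs : List Int) (a : Int) :
    (pvAccumulate xs a).length = xs.length := by
  induction xs generalizing a with
  | nil => rfl
  | cons x rest ih => simp [pvAccumulate, ih]

theorem pvFindIdxGT_map_shift (l : List Int) (c b : Int) :
    pvFindIdxGT (l.map (fun t => c + t)) b = pvFindIdxGT l (b - c) := by
  induction l with
  | nil => rfl
  | cons t rest ih =>
    simp only [List.map_cons, pvFindIdxGT, ih]
    by_cases h : b < c + t
    · rw [if_pos h, if_pos (by omega)]
    · rw [if_neg h, if_neg (by omega)]

theorem pvFindIdxGT_le (l : List Int) (b : Int) : pvFindIdxGT l b ≤ l.length := by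
  induction l with
  | nil => exact Nat.le_refl 0
  | cons t rest ih =>
    simp only [pvFindIdxGT, List.length_cons]
    split
    · omega
    · omega

theorem getD_map_add (l : List Int) (c : Int) (j : Nat) (h : j < l.length) :
    (l.map (fun t => c + t)).getD j 0 = c + l.getD j 0 := by
  rw [List.getD_eq_getElem _ _ (by simpa using h), List.getD_eq_getElem _ _ h, List.getElem_map]

-- B's pipeline on a cons, first claim over budget
theorem alt_cons_over (claim : List (String × String)) (rest : List (List (String × String))) (tb : Int)
    (h : tb < ((PySem.Str.split₀ ((PySem.Dict.ofList claim).getD "content" "")).length : Int)) :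
    compress_claims_alt (claim :: rest) tb =
      if tb ≤ 0 then []
      else [((PySem.Dict.ofList claim).insert "content"
              (PySem.Str.join " " (PySem.List.slice (PySem.Str.split₀ ((PySem.Dict.ofList claim).getD "content" "")) none (some tb)) ++ "...")).items] := by
  simp only [compress_claims_alt, List.map_cons, pvAccumulate, zero_add, pvFindIdxGT, if_pos h,
    List.length_cons, List.take_zero, List.getD_cons_zero,
    if_pos (Nat.succ_pos rest.length), List.nil_append]
  rw [if_neg (lt_irrefl 0)]
  by_cases h2 : tb ≤ 0
  · rw [if_neg (show ¬ (0:Int) < tb - 0 by omega), if_pos h2]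
  · rw [if_pos (show (0:Int) < tb - 0 by omega), if_neg h2]
    simp only [sub_zero]

-- B's pipeline on a cons, first claim kept
theorem alt_cons_keep (claim : List (String × String)) (rest : List (List (String × String))) (tb : Int)
    (h : ((PySem.Str.split₀ ((PySem.Dict.ofList claim).getD "content" "")).length : Int) ≤ tb) :
    compress_claims_alt (claim :: rest) tb =
      claim :: compress_claims_alt rest (tb - ((PySem.Str.split₀ ((PySem.Dict.ofList claim).getD "content" "")).length : Int)) := by
  revert h
  simp only [compress_claims_alt, List.map_cons, pvAccumulate, zero_add]
  rw [pvAccumulate_shift]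
  generalize hT : PySem.Str.split₀ ((PySem.Dict.ofList claim).getD "content" "") = toksC
  generalize hR : pvAccumulate ((rest.map (fun c => PySem.Str.split₀ ((PySem.Dict.ofList c).getD "content" ""))).map (fun t => (t.length : Int))) 0 = totalsR
  intro h
  have hlenTR : totalsR.length = rest.length := by
    rw [← hR, pvAccumulate_length]; simp
  simp only [pvFindIdxGT, if_neg (show ¬ tb < (toksC.length : Int) by omega), pvFindIdxGT_map_shift]
  have hiRle := pvFindIdxGT_le totalsR (tb - (toksC.length : Int))
  generalize hiR : pvFindIdxGT totalsR (tb - (toksC.length : Int)) = iR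
  rw [hiR] at hiRle
  simp only [List.length_cons, List.take_succ_cons, List.getD_cons_succ]
  have hbefore : (if 0 < iR + 1 then ((toksC.length : Int) :: totalsR.map (fun t => (toksC.length : Int) + t)).getD (iR + 1 - 1) 0 else 0)
      = (toksC.length : Int) + (if 0 < iR then totalsR.getD (iR - 1) 0 else 0) := by
    rw [if_pos (show 0 < iR + 1 by omega)]
    by_cases h0 : 0 < iR
    · rw [if_pos h0, show iR + 1 - 1 = (iR - 1) + 1 by omega, List.getD_cons_succ,
          getD_map_add _ _ _ (by omega)]
    · rw [if_neg h0, show iR = 0 by omega]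
      simp
  rw [hbefore, sub_add_eq_sub_sub]
  by_cases hguard : iR < rest.length
  · rw [if_pos (show iR + 1 < rest.length + 1 by omega), if_pos hguard]
    by_cases hrem : 0 < tb - (toksC.length : Int) - (if 0 < iR then totalsR.getD (iR - 1) 0 else 0)
    · rw [if_pos hrem, if_pos hrem, List.cons_append]
    · rw [if_neg hrem, if_neg hrem]
  · rw [if_neg (show ¬ iR + 1 < rest.length + 1 by omega), if_neg (show ¬ iR < rest.length by omega)]

theorem compress_claims_go_shift (claims : List (List (String × String))) (token_budget tokens_used : Int) :
    compress_claims_go token_budget claims tokens_used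
      = compress_claims_go (token_budget - tokens_used) claims 0 := by
  induction claims generalizing token_budget tokens_used with
  | nil => rfl
  | cons claim rest ih =>
    simp only [compress_claims_go]
    generalize hT : ((PySem.Str.split₀ ((PySem.Dict.ofList claim).getD "content" "")).length : Int) = L
    by_cases h : tokens_used + L ≤ token_budget
    · rw [if_pos h, if_pos (show 0 + L ≤ token_budget - tokens_used by omega),
          ih token_budget (tokens_used + L), ih (token_budget - tokens_used) (0 + L),
          show token_budget - (tokens_used + L) = token_budget - tokens_used - (0 + L) by omega]
    · rw [if_neg h, if_neg (show ¬ 0 + L ≤ token_budget - tokens_used by omega)]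
      by_cases h2 : token_budget - tokens_used ≤ 0
      · rw [if_pos h2, if_pos (show token_budget - tokens_used - 0 ≤ 0 by omega)]
      · rw [if_neg h2, if_neg (show ¬ token_budget - tokens_used - 0 ≤ 0 by omega), sub_zero]

theorem compress_claims_go_eq_alt (claims : List (List (String × String))) (token_budget : Int) :
    compress_claims_go token_budget claims 0 = compress_claims_alt claims token_budget := by
  induction claims generalizing token_budget with
  | nil => rfl
  | cons claim rest ih =>
    by_cases h : ((PySem.Str.split₀ ((PySem.Dict.ofList claim).getD "content" "")).length : Int) ≤ token_budget
    · simp only [compress_claims_go]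
      rw [if_pos (show 0 + ((PySem.Str.split₀ ((PySem.Dict.ofList claim).getD "content" "")).length : Int) ≤ token_budget by omega),
          compress_claims_go_shift,
          show token_budget - (0 + ((PySem.Str.split₀ ((PySem.Dict.ofList claim).getD "content" "")).length : Int))
             = token_budget - ((PySem.Str.split₀ ((PySem.Dict.ofList claim).getD "content" "")).length : Int) by omega,
          ih, alt_cons_keep _ _ _ h]
    · simp only [compress_claims_go]
      rw [if_neg (show ¬ 0 + ((PySem.Str.split₀ ((PySem.Dict.ofList claim).getD "content" "")).length : Int) ≤ token_budget by omega),
          alt_cons_over _ _ _ (by omega)]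
      simp only [sub_zero]

-- ===== VERDICT (by name: the statement is the Claim_ definition above) =====
theorem compress_claims_spec : Claim_equal_compress_claims := by
  intro claims token_budget _
  unfold Spec_compress_claims compress_claims
  exact compress_claims_go_eq_alt claims token_budget
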